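-- pv_equiv track=rewrite | github.com/a19130616-lab/crossword-master | backend/generator/solver.py | cell_word_lengths
-- ===== SOURCE A (Python) =====
-- def run_length(grid, r, c, dr, dc):
--     rows = len(grid)
--     cols = len(grid[0]) if rows else 0
--     length = 0
--     rr, cc = r, c
--     while 0 <= rr < rows and 0 <= cc < cols and grid[rr][cc] != '#':
--         length += 1
--         rr += dr
--         cc += dc
--     return length
--
-- def cell_word_lengths(grid, r, c):
--     cc = c
--     while cc > 0 and grid[r][cc - 1] != '#':
--         cc -= 1
--     across = run_length(grid, r, cc, 0, 1)
--     rr = r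
--     while rr > 0 and grid[rr - 1][c] != '#':
--         rr -= 1
--     down = run_length(grid, rr, c, 1, 0)
--     return across, down
-- ===== SOURCE B (Python) =====
-- def cell_word_lengths(grid, r, c):
--     rows = len(grid)
--     cols = len(grid[0]) if rows else 0
--     if not (0 <= r < rows and 0 <= c < cols):
--         return (0, 0)  # a cell outside the grid lies in no word
--     row = grid[r]
--     left = 0
--     while c - left > 0 and row[c - left - 1] != '#':
--         left += 1
--     right = 0
--     while c + right < cols and row[c + right] != '#':
--         right += 1
--     up = 0
--     while r - up > 0 and grid[r - up - 1][c] != '#':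
--         up += 1
--     down = 0
--     while r + down < rows and grid[r + down][c] != '#':
--         down += 1
--     return (left + right, up + down)
-- ===== Notes on version B (the rewrite author's own statement) =====
-- stated objective: simpler
-- what changed: B counts non-'#' cells outward from the cell itself (left+right, up+down) in four short counting loops and returns (0,0) for a cell outside the grid, instead of A's walk-to-word-start followed by a separate full run_length rescan of the whole run.
-- intended difference: For a cell just past the end of a word run (c >= cols with row r non-'#' from column cols-1 through c-1, or r == rows, c == 0 with grid[rows-1][0] not '#') A returns the length of the adjacent run while B returns (0, 0); B's value is intended because a cell outside the grid lies in no word. — e.g. on cell_word_lengths([["a", "b"]], 0, 2): A returns (2, 0), B returns (0, 0)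
import Mathlib
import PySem

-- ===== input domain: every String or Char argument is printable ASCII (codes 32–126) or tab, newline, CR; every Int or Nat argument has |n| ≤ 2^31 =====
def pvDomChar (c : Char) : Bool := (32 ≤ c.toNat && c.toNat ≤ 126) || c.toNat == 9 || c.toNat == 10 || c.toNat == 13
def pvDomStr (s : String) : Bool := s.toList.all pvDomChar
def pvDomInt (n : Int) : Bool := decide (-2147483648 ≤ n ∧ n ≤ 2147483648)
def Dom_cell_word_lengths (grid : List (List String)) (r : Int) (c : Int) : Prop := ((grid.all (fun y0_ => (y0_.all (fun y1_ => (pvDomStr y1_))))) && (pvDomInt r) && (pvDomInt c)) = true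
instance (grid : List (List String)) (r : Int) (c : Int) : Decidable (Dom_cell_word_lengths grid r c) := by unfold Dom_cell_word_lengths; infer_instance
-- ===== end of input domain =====

-- B replaces A's walk-to-word-start plus a separate run_length rescan by four short counts
-- outward from the cell itself (left+right, up+down), returning (0, 0) for a cell outside
-- the grid; objective: simpler, same cost.

-- shared cell accessors: grid[r], grid[r][c] (an out-of-range read yields "#", which only
-- stops a scan; inside Pre_ every read Python makes is in range, so the default is unused)
def pvRowOf (grid : List (List String)) (r : Int) : List String :=
  (PySem.List.pyGet? grid r).getD []

def pvCell (grid : List (List String)) (r : Int) (c : Int) : String :=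
  (PySem.List.pyGet? (pvRowOf grid r) c).getD "#"

-- cols = len(grid[0]) if rows else 0
def pvColsOf (grid : List (List String)) : Int :=
  if (grid.length : Int) ≠ 0 then ((pvRowOf grid 0).length : Int) else 0

-- len(grid[i]) as an Int (row i read with Python's index rules)
def pvRowLen (grid : List (List String)) (i : Int) : Int :=
  ((pvRowOf grid i).length : Int)

-- ===== PORT A =====
-- the 'while cc > 0 and f(cc-1) != "#": cc -= 1' walk (f reads the fixed row / column);
-- fuel = starting index: the loop makes at most that many steps
def pvWordStart (f : Int → String) : Nat → Int → Int
  | 0, cc => cc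
  | n + 1, cc =>
      if 0 < cc ∧ f (cc - 1) ≠ "#" then pvWordStart f n (cc - 1) else cc

-- the while loop of run_length; fuel: for the calls (dr,dc)=(0,1)/(1,0) at most rows+cols steps
def pvRunLoop (grid : List (List String)) (rows cols dr dc : Int) :
    Nat → Int → Int → Int → Int
  | 0, len, _, _ => len
  | n + 1, len, rr, cc =>
      if 0 ≤ rr ∧ rr < rows ∧ 0 ≤ cc ∧ cc < cols ∧ pvCell grid rr cc ≠ "#" then
        pvRunLoop grid rows cols dr dc n (len + 1) (rr + dr) (cc + dc)
      else len

def run_length (grid : List (List String)) (r c dr dc : Int) : Int :=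
  pvRunLoop grid (grid.length : Int) (pvColsOf grid) dr dc
    ((grid.length : Int).toNat + (pvColsOf grid).toNat) 0 r c

def cell_word_lengths (grid : List (List String)) (r : Int) (c : Int) : Int × Int :=
  (run_length grid r (pvWordStart (fun i => pvCell grid r i) c.toNat c) 0 1,
   run_length grid (pvWordStart (fun i => pvCell grid i c) r.toNat r) c 1 0)

-- ===== PORT B =====
-- 'k = 0; while s - k > 0 and f(s - k - 1) != "#": k += 1' (count backwards from s, exclusive)
def pvCountBack (f : Int → String) (s : Int) : Nat → Int → Int
  | 0, k => k
  | n + 1, k =>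
      if 0 < s - k ∧ f (s - k - 1) ≠ "#" then pvCountBack f s n (k + 1) else k

-- 'k = 0; while s + k < n and f(s + k) != "#": k += 1' (count forwards from s, inclusive)
def pvCountFwd (f : Int → String) (n s : Int) : Nat → Int → Int
  | 0, k => k
  | m + 1, k =>
      if s + k < n ∧ f (s + k) ≠ "#" then pvCountFwd f n s m (k + 1) else k

def cell_word_lengths_alt (grid : List (List String)) (r : Int) (c : Int) : Int × Int :=
  if 0 ≤ r ∧ r < (grid.length : Int) ∧ 0 ≤ c ∧ c < pvColsOf grid then
    (pvCountBack (fun i => pvCell grid r i) c c.toNat 0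
       + pvCountFwd (fun i => pvCell grid r i) (pvColsOf grid) c (pvColsOf grid - c).toNat 0,
     pvCountBack (fun i => pvCell grid i c) r r.toNat 0
       + pvCountFwd (fun i => pvCell grid i c) ((grid.length : Int)) r ((grid.length : Int) - r).toNat 0)
  else (0, 0)  -- a cell outside the grid lies in no word

-- ===== PRECONDITION & SPEC =====
-- a Python index c is valid for a row (Python's negative-wraparound rule)
def pvInRange (c : Int) (row : List String) : Bool :=
  decide (-(row.length : Int) ≤ c ∧ c < (row.length : Int))

-- row[c] can be read and is not '#' (so a vertical scan passes through this row)
def pvPassable (c : Int) (row : List String) : Bool :=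
  pvInRange c row && ((PySem.List.pyGet? row c).getD "#") != "#"

-- a vertical scan over the rows rs (in scan order) makes only in-range reads:
-- the first non-passable row it meets, if any, blocks it with an in-range '#'
def pvWalkOk (c : Int) (rs : List (List String)) : Bool :=
  match rs.find? (fun row => !pvPassable c row) with
  | none => true
  | some row => pvInRange c row

-- every read of the vertical up-walk (rows r-1 … 0) and of the down run (rows r, r+1, …,
-- only reached when 0 ≤ c < cols) is in range
def pvDownOk (grid : List (List String)) (r c : Int) : Prop :=
  pvWalkOk c ((grid.take (min r.toNat grid.length)).reverse) = true
  ∧ (0 ≤ c → c < pvColsOf grid → pvWalkOk c (grid.drop (min r.toNat grid.length)) = true)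

-- Pre_ admits exactly the inputs on which Python A returns: everything excluded makes A
-- raise an IndexError through an out-of-range row or cell read (in ragged grids included,
-- a scan is fine precisely when a '#' or a boundary stops it before any out-of-range read).
def Pre_cell_word_lengths (grid : List (List String)) (r : Int) (c : Int) : Prop :=
  (r < 0 ∧ (c ≤ 0 ∨ (-(grid.length : Int) ≤ r ∧ c ≤ pvRowLen grid r)))
  ∨ (0 ≤ r ∧ r < (grid.length : Int) ∧
      (0 ≤ c → c ≤ pvRowLen grid r ∧
        (pvColsOf grid ≤ pvRowLen grid r ∨ pvColsOf grid ≤ c ∨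
          "#" ∈ (pvRowOf grid r).drop (min c.toNat (pvRowOf grid r).length))) ∧
      pvDownOk grid r c)
  ∨ (r = (grid.length : Int) ∧ c ≤ 0 ∧ pvDownOk grid r c)

instance (grid : List (List String)) (r : Int) (c : Int) :
    Decidable (Pre_cell_word_lengths grid r c) := by
  unfold Pre_cell_word_lengths pvDownOk; infer_instance

def pvWitness_cell_word_lengths : List (List String) × Int × Int :=
  ([["a", "#", "b"], ["c", "d", "#"]], 1, 0)

-- For a cell just past the end of a word run — c ≥ cols with row r non-'#' from column
-- cols-1 through c-1, or r = rows, c = 0 with grid[rows-1][0] not '#' — A returns the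
-- length of that adjacent run while B returns (0, 0); B's value is intended because a
-- cell outside the grid lies in no word.
def D_cell_word_lengths (grid : List (List String)) (r : Int) (c : Int) : Prop :=
  (0 ≤ r ∧ r < (grid.length : Int) ∧ 0 < pvColsOf grid ∧ pvColsOf grid ≤ c ∧
    ∀ k ∈ List.range (min (c - pvColsOf grid + 1).toNat ((pvRowOf grid r).length + 2)),
      pvCell grid r (pvColsOf grid - 1 + (k : Int)) ≠ "#")
  ∨ (r = (grid.length : Int) ∧ 0 < (grid.length : Int) ∧ c = 0 ∧ 0 < pvColsOf grid ∧
      pvCell grid ((grid.length : Int) - 1) 0 ≠ "#")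

instance (grid : List (List String)) (r : Int) (c : Int) :
    Decidable (D_cell_word_lengths grid r c) := by
  unfold D_cell_word_lengths; infer_instance

def Spec_cell_word_lengths (grid : List (List String)) (r : Int) (c : Int) (out : Int × Int) : Prop := ¬ D_cell_word_lengths grid r c → out = cell_word_lengths_alt grid r c
instance (grid : List (List String)) (r : Int) (c : Int) (out : Int × Int) : Decidable (Spec_cell_word_lengths grid r c out) := by unfold Spec_cell_word_lengths; infer_instance

def pvDiffWitness_cell_word_lengths : List (List String) × Int × Int :=
  ([["a", "b"]], 0, 2)

def pvDiffWitnessOut_cell_word_lengths : (Int × Int) × (Int × Int) := ((2, 0), (0, 0))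

-- ===== CLAIM (what is proved, stated in full; the proofs are below) =====
def Claim_unchanged_cell_word_lengths : Prop := ∀ (grid : List (List String)) (r : Int) (c : Int), Dom_cell_word_lengths grid r c → Pre_cell_word_lengths grid r c → Spec_cell_word_lengths grid r c (cell_word_lengths grid r c)
def Claim_changed_cell_word_lengths : Prop := Dom_cell_word_lengths (pvDiffWitness_cell_word_lengths.1) (pvDiffWitness_cell_word_lengths.2.1) (pvDiffWitness_cell_word_lengths.2.2) ∧ Pre_cell_word_lengths (pvDiffWitness_cell_word_lengths.1) (pvDiffWitness_cell_word_lengths.2.1) (pvDiffWitness_cell_word_lengths.2.2) ∧ D_cell_word_lengths (pvDiffWitness_cell_word_lengths.1) (pvDiffWitness_cell_word_lengths.2.1) (pvDiffWitness_cell_word_lengths.2.2) ∧ cell_word_lengths (pvDiffWitness_cell_word_lengths.1) (pvDiffWitness_cell_word_lengths.2.1) (pvDiffWitness_cell_word_lengths.2.2) = pvDiffWitnessOut_cell_word_lengths.1 ∧ cell_word_lengths_alt (pvDiffWitness_cell_word_lengths.1) (pvDiffWitness_cell_word_lengths.2.1) (pvDiffWitness_cell_word_lengths.2.2) = pvDiffWitnessOut_cell_word_lengths.2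 ∧ pvDiffWitnessOut_cell_word_lengths.1 ≠ pvDiffWitnessOut_cell_word_lengths.2
def Claim_exact_cell_word_lengths : Prop := ∀ (grid : List (List String)) (r : Int) (c : Int), Dom_cell_word_lengths grid r c → Pre_cell_word_lengths grid r c → D_cell_word_lengths grid r c → cell_word_lengths grid r c ≠ cell_word_lengths_alt grid r c

-- ===== LEMMAS AND PROOFS =====

-- exact length of the maximal non-"#" run of f starting at p (bounded by n)
def pvRunSpec (f : Int → String) (n : Int) (p : Int) : Int :=
  if h : p < n ∧ f p ≠ "#" then 1 + pvRunSpec f n (p + 1) else 0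
termination_by (n - p).toNat
decreasing_by
  obtain ⟨h1, _⟩ := h; omega

theorem pvRunSpec_pos (f : Int → String) (n p : Int) (h1 : p < n) (h2 : f p ≠ "#") :
    pvRunSpec f n p = 1 + pvRunSpec f n (p + 1) := by
  rw [pvRunSpec]; simp [h1, h2]

theorem pvRunSpec_neg (f : Int → String) (n p : Int) (h : ¬(p < n ∧ f p ≠ "#")) :
    pvRunSpec f n p = 0 := by
  rw [pvRunSpec]; simp only [dif_neg h]

-- a run loop / walk started where its guard fails returns immediately
theorem runLoop_stop (grid : List (List String)) (rows cols dr dc rr cc : Int)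
    (h : ¬(0 ≤ rr ∧ rr < rows ∧ 0 ≤ cc ∧ cc < cols ∧ pvCell grid rr cc ≠ "#")) :
    ∀ (fuel : Nat) (len : Int), pvRunLoop grid rows cols dr dc fuel len rr cc = len := by
  intro fuel len
  cases fuel with
  | zero => rw [pvRunLoop]
  | succ m => rw [pvRunLoop, if_neg h]

theorem wordStart_stop (f : Int → String) (cc : Int)
    (h : ¬(0 < cc ∧ f (cc - 1) ≠ "#")) :
    ∀ (n : Nat), pvWordStart f n cc = cc := by
  intro n
  cases n with
  | zero => rw [pvWordStart]
  | succ m => rw [pvWordStart, if_neg h]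

-- the across run_length loop computes pvRunSpec along the row
theorem runLoop_across (grid : List (List String)) (rows cols r : Int)
    (hr0 : 0 ≤ r) (hr1 : r < rows) :
    ∀ (fuel : Nat) (p len : Int), 0 ≤ p → (cols - p).toNat ≤ fuel →
      pvRunLoop grid rows cols 0 1 fuel len r p
        = len + pvRunSpec (fun i => pvCell grid r i) cols p := by
  intro fuel
  induction fuel with
  | zero =>
      intro p len hp hf
      rw [pvRunLoop, pvRunSpec_neg]
      · omega
      · intro h; omega
  | succ m ih =>
      intro p len hp hf
      rw [pvRunLoop]
      by_cases hc : 0 ≤ r ∧ r < rows ∧ 0 ≤ p ∧ p < cols ∧ pvCell grid r p ≠ "#"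
      · rw [if_pos hc, add_zero, ih (p + 1) (len + 1) (by omega) (by omega),
          pvRunSpec_pos _ _ _ hc.2.2.2.1 hc.2.2.2.2]
        have he : pvRunSpec (pvCell grid r) cols (p + 1)
            = pvRunSpec (fun i => pvCell grid r i) cols (p + 1) := rfl
        omega
      · rw [if_neg hc, pvRunSpec_neg]
        · omega
        · intro h
          exact hc ⟨hr0, hr1, hp, h.1, h.2⟩

-- the down run_length loop computes pvRunSpec along the column
theorem runLoop_down (grid : List (List String)) (rows cols c : Int)
    (hc0 : 0 ≤ c) (hc1 : c < cols) :
    ∀ (fuel : Nat) (p len : Int), 0 ≤ p → (rows - p).toNat ≤ fuel →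
      pvRunLoop grid rows cols 1 0 fuel len p c
        = len + pvRunSpec (fun i => pvCell grid i c) rows p := by
  intro fuel
  induction fuel with
  | zero =>
      intro p len hp hf
      rw [pvRunLoop, pvRunSpec_neg]
      · omega
      · intro h; omega
  | succ m ih =>
      intro p len hp hf
      rw [pvRunLoop]
      by_cases hc : 0 ≤ p ∧ p < rows ∧ 0 ≤ c ∧ c < cols ∧ pvCell grid p c ≠ "#"
      · rw [if_pos hc, add_zero, ih (p + 1) (len + 1) (by omega) (by omega),
          pvRunSpec_pos _ _ _ hc.2.1 hc.2.2.2.2]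
        omega
      · rw [if_neg hc, pvRunSpec_neg]
        · omega
        · intro h
          exact hc ⟨hp, h.1, hc0, hc1, h.2⟩

-- B's forward count computes the same pvRunSpec
theorem countFwd_spec (f : Int → String) (n s : Int) :
    ∀ (fuel : Nat) (k : Int), (n - (s + k)).toNat ≤ fuel →
      pvCountFwd f n s fuel k = k + pvRunSpec f n (s + k) := by
  intro fuel
  induction fuel with
  | zero =>
      intro k hf
      rw [pvCountFwd, pvRunSpec_neg]
      · omega
      · intro h; omega
  | succ m ih =>
      intro k hf
      rw [pvCountFwd]
      by_cases hc : s + k < n ∧ f (s + k) ≠ "#"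
      · rw [if_pos hc, ih (k + 1) (by omega), pvRunSpec_pos _ _ _ hc.1 hc.2]
        have h1 : s + (k + 1) = (s + k) + 1 := by ring
        rw [h1]
        omega
      · rw [if_neg hc, pvRunSpec_neg _ _ _ hc]
        omega

-- B's backward count and A's word-start walk are the same loop, counted differently
theorem countBack_wordStart (f : Int → String) (s : Int) :
    ∀ (n : Nat) (k : Int), pvWordStart f n (s - k) = s - pvCountBack f s n k := by
  intro n
  induction n with
  | zero => intro k; rw [pvWordStart, pvCountBack]
  | succ m ih =>
      intro k
      rw [pvWordStart, pvCountBack]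
      by_cases hc : 0 < s - k ∧ f (s - k - 1) ≠ "#"
      · rw [if_pos hc, if_pos hc]
        have h1 : s - k - 1 = s - (k + 1) := by ring
        rw [h1, ih (k + 1)]
      · rw [if_neg hc, if_neg hc]

theorem wordStart_nonneg (f : Int → String) :
    ∀ (n : Nat) (cc : Int), 0 ≤ cc → 0 ≤ pvWordStart f n cc := by
  intro n
  induction n with
  | zero => intro cc h; rw [pvWordStart]; exact h
  | succ m ih =>
      intro cc h
      rw [pvWordStart]
      by_cases hc : 0 < cc ∧ f (cc - 1) ≠ "#"
      · rw [if_pos hc]; exact ih _ (by omega)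
      · rw [if_neg hc]; exact h

theorem wordStart_le (f : Int → String) :
    ∀ (n : Nat) (cc : Int), pvWordStart f n cc ≤ cc := by
  intro n
  induction n with
  | zero => intro cc; rw [pvWordStart]
  | succ m ih =>
      intro cc
      rw [pvWordStart]
      by_cases hc : 0 < cc ∧ f (cc - 1) ≠ "#"
      · rw [if_pos hc]; have := ih (cc - 1); omega
      · rw [if_neg hc]

theorem wordStart_run (f : Int → String) :
    ∀ (n : Nat) (cc j : Int), pvWordStart f n cc ≤ j → j < cc → f j ≠ "#" := by
  intro n
  induction n with
  | zero => intro cc j h1 h2; rw [pvWordStart] at h1; omega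
  | succ m ih =>
      intro cc j h1 h2
      rw [pvWordStart] at h1
      by_cases hc : 0 < cc ∧ f (cc - 1) ≠ "#"
      · rw [if_pos hc] at h1
        by_cases hj : j = cc - 1
        · rw [hj]; exact hc.2
        · exact ih (cc - 1) j h1 (by omega)
      · rw [if_neg hc] at h1; omega

-- the walk never steps down past a '#': its result stays strictly above any '#' below cc
theorem wordStart_gt_hash (f : Int → String) :
    ∀ (n : Nat) (cc j : Int), f j = "#" → j < cc → j < pvWordStart f n cc := by
  intro n
  induction n with
  | zero => intro cc j _ h2; rw [pvWordStart]; exact h2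
  | succ m ih =>
      intro cc j h1 h2
      rw [pvWordStart]
      by_cases hc : 0 < cc ∧ f (cc - 1) ≠ "#"
      · rw [if_pos hc]
        have hj : j ≠ cc - 1 := by
          intro he; rw [he] at h1; exact hc.2 h1
        exact ih (cc - 1) j h1 (by omega)
      · rw [if_neg hc]; exact h2

-- on a stretch of non-'#' cells reaching down to t, the walk descends at least to t
theorem wordStart_le_of_run (f : Int → String) :
    ∀ (n : Nat) (cc t : Int), 0 ≤ t → t ≤ cc → (cc - t).toNat ≤ n →
      (∀ j, t ≤ j → j < cc → f j ≠ "#") → pvWordStart f n cc ≤ t := by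
  intro n
  induction n with
  | zero =>
      intro cc t _ h2 h3 _
      have : cc = t := by omega
      rw [this, pvWordStart]
  | succ m ih =>
      intro cc t h1 h2 h3 h4
      by_cases he : cc = t
      · rw [he]; exact wordStart_le f (m + 1) t
      · rw [pvWordStart, if_pos ⟨by omega, h4 (cc - 1) (by omega) (by omega)⟩]
        exact ih (cc - 1) t h1 (by omega) (by omega)
          (fun j hj1 hj2 => h4 j hj1 (by omega))

-- a run known to be non-"#" from p to q shifts pvRunSpec by q - p
theorem runSpec_shift (f : Int → String) (n q : Int) (hq : q ≤ n) :
    ∀ (d : Nat) (p : Int), (q - p).toNat ≤ d → p ≤ q →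
      (∀ j, p ≤ j → j < q → f j ≠ "#") →
      pvRunSpec f n p = (q - p) + pvRunSpec f n q := by
  intro d
  induction d with
  | zero =>
      intro p hd hpq _
      have hp : p = q := by omega
      rw [hp]; omega
  | succ m ih =>
      intro p hd hpq hrun
      by_cases hp : p = q
      · rw [hp]; omega
      · have hplt : p < q := by omega
        rw [pvRunSpec_pos f n p (by omega) (hrun p le_rfl hplt),
          ih (p + 1) (by omega) (by omega) (fun j h1 h2 => hrun j (by omega) h2)]
        omega

theorem colsOf_nonneg (grid : List (List String)) : 0 ≤ pvColsOf grid := by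
  unfold pvColsOf; split <;> simp

-- a read past the end of a row yields the '#' default
theorem pvCell_ge_len (grid : List (List String)) (r j : Int)
    (h0 : 0 ≤ j) (h : pvRowLen grid r ≤ j) : pvCell grid r j = "#" := by
  unfold pvCell
  simp [PySem.List.pyGet?, PySem.List.pyIdx?, pvRowLen] at *
  split_ifs with h1
  · omega
  · simp_all

-- B returns (0, 0) outside the grid
theorem B_out (grid : List (List String)) (r c : Int)
    (h : ¬(0 ≤ r ∧ r < (grid.length : Int) ∧ 0 ≤ c ∧ c < pvColsOf grid)) :
    cell_word_lengths_alt grid r c = (0, 0) := by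
  unfold cell_word_lengths_alt; rw [if_neg h]

-- A returns (0, 0) for a negative row index
theorem A_out_r (grid : List (List String)) (r c : Int) (hr : r < 0) :
    cell_word_lengths grid r c = (0, 0) := by
  unfold cell_word_lengths run_length
  have h0 : r.toNat = 0 := by omega
  rw [h0, pvWordStart,
    runLoop_stop _ _ _ _ _ _ _ (by rintro ⟨h1, -⟩; omega),
    runLoop_stop _ _ _ _ _ _ _ (by rintro ⟨h1, -⟩; omega)]

-- A returns (0, 0) for a negative column index
theorem A_out_c (grid : List (List String)) (r c : Int) (hc : c < 0) :
    cell_word_lengths grid r c = (0, 0) := by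
  unfold cell_word_lengths run_length
  have h0 : c.toNat = 0 := by omega
  rw [h0, pvWordStart,
    runLoop_stop _ _ _ _ _ _ _ (by rintro ⟨-, -, h3, -⟩; omega),
    runLoop_stop _ _ _ _ _ _ _ (by rintro ⟨-, -, h3, -⟩; omega)]

-- across agreement for an in-grid cell
theorem across_eq (grid : List (List String)) (r c : Int)
    (hr0 : 0 ≤ r) (hr1 : r < (grid.length : Int))
    (hc0 : 0 ≤ c) (hc1 : c < pvColsOf grid) :
    run_length grid r (pvWordStart (fun i => pvCell grid r i) c.toNat c) 0 1
      = pvCountBack (fun i => pvCell grid r i) c c.toNat 0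
        + pvCountFwd (fun i => pvCell grid r i) (pvColsOf grid) c (pvColsOf grid - c).toNat 0 := by
  have hcols0 : 0 ≤ pvColsOf grid := colsOf_nonneg grid
  set f := fun i => pvCell grid r i with hf
  set s := pvWordStart f c.toNat c with hs
  have hs0 : 0 ≤ s := wordStart_nonneg f c.toNat c hc0
  have hs1 : s ≤ c := wordStart_le f c.toNat c
  have hrun : ∀ j, s ≤ j → j < c → f j ≠ "#" := fun j h1 h2 => wordStart_run f c.toNat c j h1 h2
  have hback : pvCountBack f c c.toNat 0 = c - s := by
    have := countBack_wordStart f c c.toNat 0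
    simp only [sub_zero] at this
    omega
  have hfwd : pvCountFwd f (pvColsOf grid) c (pvColsOf grid - c).toNat 0
      = pvRunSpec f (pvColsOf grid) c := by
    have := countFwd_spec f (pvColsOf grid) c (pvColsOf grid - c).toNat 0 (by omega)
    simpa using this
  have hrl : run_length grid r s 0 1 = pvRunSpec f (pvColsOf grid) s := by
    unfold run_length
    rw [runLoop_across grid (grid.length : Int) (pvColsOf grid) r hr0 hr1 _ s 0 hs0 (by omega),
      ← hf]
    omega
  rw [hrl, hback, hfwd,
    runSpec_shift f (pvColsOf grid) c (by omega) (c - s).toNat s (by omega) hs1 hrun]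

-- down agreement for an in-grid cell
theorem down_eq (grid : List (List String)) (r c : Int)
    (hr0 : 0 ≤ r) (hr1 : r < (grid.length : Int))
    (hc0 : 0 ≤ c) (hc1 : c < pvColsOf grid) :
    run_length grid (pvWordStart (fun i => pvCell grid i c) r.toNat r) c 1 0
      = pvCountBack (fun i => pvCell grid i c) r r.toNat 0
        + pvCountFwd (fun i => pvCell grid i c) ((grid.length : Int)) r ((grid.length : Int) - r).toNat 0 := by
  have hcols0 : 0 ≤ pvColsOf grid := colsOf_nonneg grid
  set f := fun i => pvCell grid i c with hf
  set s := pvWordStart f r.toNat r with hs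
  have hs0 : 0 ≤ s := wordStart_nonneg f r.toNat r hr0
  have hs1 : s ≤ r := wordStart_le f r.toNat r
  have hrun : ∀ j, s ≤ j → j < r → f j ≠ "#" := fun j h1 h2 => wordStart_run f r.toNat r j h1 h2
  have hback : pvCountBack f r r.toNat 0 = r - s := by
    have := countBack_wordStart f r r.toNat 0
    simp only [sub_zero] at this
    omega
  have hfwd : pvCountFwd f ((grid.length : Int)) r ((grid.length : Int) - r).toNat 0
      = pvRunSpec f ((grid.length : Int)) r := by
    have := countFwd_spec f ((grid.length : Int)) r ((grid.length : Int) - r).toNat 0 (by omega)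
    simpa using this
  have hrl : run_length grid s c 1 0 = pvRunSpec f ((grid.length : Int)) s := by
    unfold run_length
    rw [runLoop_down grid (grid.length : Int) (pvColsOf grid) c hc0 hc1 _ s 0 hs0 (by omega),
      ← hf]
    omega
  rw [hrl, hback, hfwd,
    runSpec_shift f ((grid.length : Int)) r (by omega) (r - s).toNat s (by omega) hs1 hrun]

-- A = B for an in-grid cell
theorem eq_in_grid (grid : List (List String)) (r c : Int)
    (hr0 : 0 ≤ r) (hr1 : r < (grid.length : Int))
    (hc0 : 0 ≤ c) (hc1 : c < pvColsOf grid) :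
    cell_word_lengths grid r c = cell_word_lengths_alt grid r c := by
  unfold cell_word_lengths cell_word_lengths_alt
  rw [if_pos ⟨hr0, hr1, hc0, hc1⟩, Prod.mk.injEq]
  exact ⟨across_eq grid r c hr0 hr1 hc0 hc1, down_eq grid r c hr0 hr1 hc0 hc1⟩

-- A = (0, 0) at a cell right of the grid when a '#' (or cols ≤ 0) cuts it off from the run
theorem A_right_zero (grid : List (List String)) (r c : Int)
    (hc : pvColsOf grid ≤ c)
    (hstop : pvColsOf grid ≤ 0
      ∨ ∃ j, pvColsOf grid - 1 ≤ j ∧ j < c ∧ pvCell grid r j = "#") :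
    cell_word_lengths grid r c = (0, 0) := by
  unfold cell_word_lengths run_length
  rcases hstop with h | ⟨j, hj1, hj2, hj3⟩
  · rw [runLoop_stop _ _ _ _ _ _ _ (by rintro ⟨-, -, h3, h4, -⟩; omega),
      runLoop_stop _ _ _ _ _ _ _ (by rintro ⟨-, -, h3, h4, -⟩; omega)]
  · have hgt : j < pvWordStart (fun i => pvCell grid r i) c.toNat c :=
      wordStart_gt_hash (fun i => pvCell grid r i) c.toNat c j hj3 hj2
    rw [runLoop_stop _ _ _ _ _ _ _ (by rintro ⟨-, -, -, h4, -⟩; omega),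
      runLoop_stop _ _ _ _ _ _ _ (by rintro ⟨-, -, -, h4, -⟩; omega)]

-- across is positive at a cell right of the grid joined to the edge by a non-'#' run
theorem A_right_pos (grid : List (List String)) (r c : Int)
    (hr0 : 0 ≤ r) (hr1 : r < (grid.length : Int))
    (hcols : 0 < pvColsOf grid) (hc : pvColsOf grid ≤ c)
    (hrun : ∀ j, pvColsOf grid - 1 ≤ j → j < c → pvCell grid r j ≠ "#") :
    1 ≤ (cell_word_lengths grid r c).1 := by
  set cols := pvColsOf grid with hcolsdef
  set f := fun i => pvCell grid r i with hf
  set s := pvWordStart f c.toNat c with hs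
  have hs1 : s ≤ cols - 1 :=
    wordStart_le_of_run f c.toNat c (cols - 1) (by omega) (by omega) (by omega)
      (fun j h1 h2 => hrun j h1 h2)
  have hs0 : 0 ≤ s := wordStart_nonneg f c.toNat c (by omega)
  have hrun2 : ∀ j, s ≤ j → j < cols → f j ≠ "#" := by
    intro j h1 h2
    exact wordStart_run f c.toNat c j h1 (by omega)
  have hfst : (cell_word_lengths grid r c).1 = run_length grid r s 0 1 := rfl
  rw [hfst]
  unfold run_length
  rw [runLoop_across grid (grid.length : Int) cols r hr0 hr1 _ s 0 hs0 (by omega), ← hf,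
    runSpec_shift f cols cols le_rfl (cols - s).toNat s (by omega) (by omega) hrun2,
    pvRunSpec_neg f cols cols (by intro h; omega)]
  omega

-- A = (0, 0) at the cell just below the bottom of column 0 when no word touches it
theorem A_col_end (grid : List (List String)) (r c : Int)
    (hr : r = (grid.length : Int)) (hc : c = 0)
    (hstop : pvColsOf grid ≤ 0 ∨ pvCell grid ((grid.length : Int) - 1) 0 = "#") :
    cell_word_lengths grid r c = (0, 0) := by
  subst hr hc
  unfold cell_word_lengths run_length
  have h0 : (0 : Int).toNat = 0 := rfl
  rcases hstop with h | h
  · rw [h0, pvWordStart,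
      runLoop_stop _ _ _ _ _ _ _ (by rintro ⟨-, h2, -⟩; omega),
      runLoop_stop _ _ _ _ _ _ _ (by rintro ⟨-, -, -, h4, -⟩; omega)]
  · rw [h0, pvWordStart,
      wordStart_stop _ _ (by rintro ⟨h1, h2⟩; exact h2 h),
      runLoop_stop _ _ _ _ _ _ _ (by rintro ⟨-, h2, -⟩; omega),
      runLoop_stop _ _ _ _ _ _ _ (by rintro ⟨-, h2, -⟩; omega)]

-- down is positive at the cell just below a run reaching the bottom edge
theorem A_col_end_pos (grid : List (List String)) (r c : Int)
    (hr : r = (grid.length : Int)) (hlen : 0 < (grid.length : Int)) (hc : c = 0)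
    (hcols : 0 < pvColsOf grid)
    (hcell : pvCell grid ((grid.length : Int) - 1) 0 ≠ "#") :
    1 ≤ (cell_word_lengths grid r c).2 := by
  subst hr hc
  set rows := (grid.length : Int) with hrowsdef
  obtain ⟨m, hm⟩ : ∃ m, rows.toNat = m + 1 := ⟨rows.toNat - 1, by omega⟩
  set f := fun i => pvCell grid i 0 with hf
  have hcell' : f (rows - 1) ≠ "#" := hcell
  have hsval : pvWordStart f rows.toNat rows = pvWordStart f m (rows - 1) := by
    rw [hm, pvWordStart, if_pos ⟨hlen, hcell'⟩]
  set s := pvWordStart f rows.toNat rows with hs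
  have hs1 : s ≤ rows - 1 := by
    rw [hsval]; exact wordStart_le f m (rows - 1)
  have hs0 : 0 ≤ s := by
    rw [hsval]; exact wordStart_nonneg f m (rows - 1) (by omega)
  have hrun : ∀ j, s ≤ j → j < rows → f j ≠ "#" := by
    intro j h1 h2
    by_cases hj : j = rows - 1
    · rw [hj]; exact hcell'
    · exact wordStart_run f m (rows - 1) j (by rw [← hsval]; exact h1) (by omega)
  have hsnd : (cell_word_lengths grid rows 0).2 = run_length grid s 0 1 0 := rfl
  rw [hsnd]
  unfold run_length
  rw [runLoop_down grid rows (pvColsOf grid) 0 le_rfl hcols _ s 0 hs0 (by omega), ← hf,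
    runSpec_shift f rows rows le_rfl (rows - s).toNat s (by omega) (by omega) hrun,
    pvRunSpec_neg f rows rows (by intro h; omega)]
  omega

-- from ¬D_ at a cell right of the grid, extract the cutting '#'
theorem hash_of_notD (grid : List (List String)) (r c : Int)
    (hr0 : 0 ≤ r) (hr1 : r < (grid.length : Int))
    (hcols : 0 < pvColsOf grid) (hc : pvColsOf grid ≤ c)
    (hnD : ¬ D_cell_word_lengths grid r c) :
    ∃ j, pvColsOf grid - 1 ≤ j ∧ j < c ∧ pvCell grid r j = "#" := by
  by_contra hno
  push_neg at hno
  apply hnD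
  left
  refine ⟨hr0, hr1, hcols, hc, ?_⟩
  intro k hk
  rw [List.mem_range] at hk
  intro hcell
  exact hno (pvColsOf grid - 1 + (k : Int)) (by omega) (by omega) hcell

-- ===== VERDICT (by name: the statement is the Claim_ definition above) =====
theorem cell_word_lengths_spec : Claim_unchanged_cell_word_lengths := by
  unfold Claim_unchanged_cell_word_lengths
  intro grid r c _ hpre
  unfold Spec_cell_word_lengths
  intro hnD
  have hcols0 : 0 ≤ pvColsOf grid := colsOf_nonneg grid
  by_cases hr : r < 0
  · rw [A_out_r grid r c hr, B_out grid r c (by rintro ⟨h1, -⟩; omega)]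
  by_cases hc : c < 0
  · rw [A_out_c grid r c hc, B_out grid r c (by rintro ⟨-, -, h3, -⟩; omega)]
  rcases hpre with ⟨h1, -⟩ | ⟨hr0, hr1, -, -⟩ | ⟨hrr, hcc, -⟩
  · omega
  · by_cases hc1 : c < pvColsOf grid
    · exact eq_in_grid grid r c hr0 hr1 (by omega) hc1
    · -- c ≥ cols: outside D_, a '#' (or cols = 0) separates the cell from the grid
      have hstop : pvColsOf grid ≤ 0
          ∨ ∃ j, pvColsOf grid - 1 ≤ j ∧ j < c ∧ pvCell grid r j = "#" := by
        by_cases h0 : pvColsOf grid ≤ 0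
        · exact Or.inl h0
        · exact Or.inr (hash_of_notD grid r c hr0 hr1 (by omega) (by omega) hnD)
      rw [A_right_zero grid r c (by omega) hstop,
        B_out grid r c (by rintro ⟨-, -, -, h4⟩; omega)]
  · -- r = rows, c = 0
    have hc0 : c = 0 := by omega
    by_cases hlen : 0 < (grid.length : Int)
    · have hstop : pvColsOf grid ≤ 0 ∨ pvCell grid ((grid.length : Int) - 1) 0 = "#" := by
        by_cases h1 : pvColsOf grid ≤ 0
        · exact Or.inl h1
        · right
          by_contra h2
          exact hnD (Or.inr ⟨hrr, hlen, hc0, by omega, h2⟩)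
      rw [A_col_end grid r c hrr hc0 hstop,
        B_out grid r c (by rintro ⟨-, h2, -⟩; omega)]
    · -- empty grid
      have hg : grid = [] := by
        cases grid with
        | nil => rfl
        | cons x xs => simp at hlen
      subst hg
      have hre : r = 0 := by simpa using hrr
      subst hre hc0
      decide

theorem cell_word_lengths_changed : Claim_changed_cell_word_lengths := by
  unfold Claim_changed_cell_word_lengths; decide

theorem cell_word_lengths_tight : Claim_exact_cell_word_lengths := by
  unfold Claim_exact_cell_word_lengths
  intro grid r c _ _ hD heq
  have hcols0 : 0 ≤ pvColsOf grid := colsOf_nonneg grid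
  rcases hD with ⟨hr0, hr1, hcols, hcc, hall⟩ | ⟨hr, hlen, hc, hcols, hcell⟩
  · have hlen : pvRowLen grid r = ((pvRowOf grid r).length : Int) := rfl
    have hcb : c ≤ pvColsOf grid + pvRowLen grid r := by
      by_contra hx
      have hk : (pvRowOf grid r).length
          ∈ List.range (min (c - pvColsOf grid + 1).toNat ((pvRowOf grid r).length + 2)) := by
        rw [List.mem_range]; omega
      exact hall _ hk (pvCell_ge_len grid r _ (by omega) (by omega))
    have hrun : ∀ j, pvColsOf grid - 1 ≤ j → j < c → pvCell grid r j ≠ "#" := by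
      intro j h1 h2
      have hk : (j - (pvColsOf grid - 1)).toNat
          ∈ List.range (min (c - pvColsOf grid + 1).toNat ((pvRowOf grid r).length + 2)) := by
        rw [List.mem_range]; omega
      have := hall _ hk
      have he : pvColsOf grid - 1 + ((j - (pvColsOf grid - 1)).toNat : Int) = j := by omega
      rwa [he] at this
    have hA := A_right_pos grid r c hr0 hr1 hcols hcc hrun
    have hB : cell_word_lengths_alt grid r c = (0, 0) :=
      B_out grid r c (by rintro ⟨-, -, -, h4⟩; omega)
    rw [heq, hB] at hA
    simp at hA
  · have hA := A_col_end_pos grid r c hr hlen hc hcols hcell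
    have hB : cell_word_lengths_alt grid r c = (0, 0) :=
      B_out grid r c (by rintro ⟨-, h2, -⟩; omega)
    rw [heq, hB] at hA
    simp at hA
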